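-- pv_equiv track=rewrite | github.com/adarshsinghuttam/AI-Based-Desktop-Assistant | main.py | get_command_intent
-- ===== SOURCE A (Python) =====
-- def get_command_intent(text):
--     """Determine the intent of a command"""
--     text_lower = text.lower()
--
--     if any(word in text_lower for word in ["weather", "temperature", "forecast"]):
--         return "weather"
--
--     elif any(word in text_lower for word in ["news", "headlines", "latest"]):
--         return "news"
--
--     elif any(word in text_lower for word in ["remind", "reminder", "schedule"]):
--         return "reminder"
--
--     elif any(word in text_lower for word in ["time", "date", "day"]):
--         return "time"
--
--     elif any(word in text_lower for word in ["help", "command", "what can you do"]):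
--         return "help"
--
--     return "general"
-- ===== SOURCE B (Python) =====
-- _KEYWORD_RANKS = [
--     ("weather", 0), ("temperature", 0), ("forecast", 0),
--     ("news", 1), ("headlines", 1), ("latest", 1),
--     ("remind", 2), ("reminder", 2), ("schedule", 2),
--     ("time", 3), ("date", 3), ("day", 3),
--     ("help", 4), ("command", 4), ("what can you do", 4),
-- ]
-- _INTENTS = ["weather", "news", "reminder", "time", "help"]
--
--
-- def get_command_intent(text):
--     """Determine the intent of a command"""
--     t = text.lower()
--     hits = [rank for kw, rank in _KEYWORD_RANKS if kw in t]
--     return _INTENTS[min(hits)] if hits else "general"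
-- ===== Notes on version B (the rewrite author's own statement) =====
-- stated objective: alternative
-- what changed: Instead of A's short-circuit if/elif ladder over keyword groups, B flattens every keyword to a numeric priority rank, collects ALL matching ranks in one comprehension, and selects the intent of the minimum rank (min-aggregation instead of first-match control flow).
import Mathlib
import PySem

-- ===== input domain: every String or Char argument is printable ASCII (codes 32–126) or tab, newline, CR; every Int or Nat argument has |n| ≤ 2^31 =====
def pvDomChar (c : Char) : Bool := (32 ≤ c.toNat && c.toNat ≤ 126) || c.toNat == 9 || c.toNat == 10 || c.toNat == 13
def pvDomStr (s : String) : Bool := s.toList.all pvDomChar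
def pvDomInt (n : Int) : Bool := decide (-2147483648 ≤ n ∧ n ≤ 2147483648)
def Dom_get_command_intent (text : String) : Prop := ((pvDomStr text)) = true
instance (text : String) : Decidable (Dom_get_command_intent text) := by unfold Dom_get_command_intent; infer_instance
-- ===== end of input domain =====

-- B replaces A's short-circuit if/elif ladder by min-rank aggregation over a flat keyword→priority list (alternative; same cost).


-- ===== PORT A =====
def get_command_intent (text : String) : String :=
  let text_lower := PySem.Str.lower text
  if ["weather", "temperature", "forecast"].any (fun word => PySem.Str.isIn word text_lower) then
    "weather"
  else if ["news", "headlines", "latest"].any (fun word => PySem.Str.isIn word text_lower) then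
    "news"
  else if ["remind", "reminder", "schedule"].any (fun word => PySem.Str.isIn word text_lower) then
    "reminder"
  else if ["time", "date", "day"].any (fun word => PySem.Str.isIn word text_lower) then
    "time"
  else if ["help", "command", "what can you do"].any (fun word => PySem.Str.isIn word text_lower) then
    "help"
  else
    "general"

-- ===== PORT B =====  (Source B: flat keyword→rank list, collect all matching ranks, select intent of the minimum rank)
def kwRanks : List (String × Int) :=
  [("weather", 0), ("temperature", 0), ("forecast", 0),
   ("news", 1), ("headlines", 1), ("latest", 1),
   ("remind", 2), ("reminder", 2), ("schedule", 2),
   ("time", 3), ("date", 3), ("day", 3),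
   ("help", 4), ("command", 4), ("what can you do", 4)]

def intentNames : List String := ["weather", "news", "reminder", "time", "help"]

-- 'hits = [rank for kw, rank in _KEYWORD_RANKS if kw in t]'
def hitsOf (t : String) : List Int :=
  (kwRanks.filter (fun p => PySem.Str.isIn p.1 t)).map (fun p => p.2)

def get_command_intent_alt (text : String) : String :=
  let t := PySem.Str.lower text
  -- '_INTENTS[min(hits)] if hits else "general"'; min(hits) is provably in [0,4], so pyGetD is exact here
  match PySem.List.min? (hitsOf t) (fun r => r) with
  | none => "general"
  | some m => PySem.List.pyGetD intentNames m ""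

-- ===== PRECONDITION & SPEC =====
def Spec_get_command_intent (text : String) (out : String) : Prop := out = get_command_intent_alt text
instance (text : String) (out : String) : Decidable (Spec_get_command_intent text out) := by unfold Spec_get_command_intent; infer_instance

-- ===== CLAIM (what is proved, stated in full; the proofs are below) =====
def Claim_equal_get_command_intent : Prop := ∀ (text : String), Dom_get_command_intent text → Spec_get_command_intent text (get_command_intent text)

-- ===== LEMMAS AND PROOFS =====

-- min() of a list of Ints is any member that bounds the list from below
theorem min?_id_eq_of {l : List Int} {k : Int} (hk : k ∈ l) (hmin : ∀ r ∈ l, k ≤ r) :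
    PySem.List.min? l (fun r => r) = some k := by
  cases hmo : PySem.List.min? l (fun r => r) with
  | none =>
    rw [PySem.List.min?_eq_none_iff] at hmo
    subst hmo; cases hk
  | some m =>
    have h1 : m ≤ k := PySem.List.min?_isMin hmo k hk
    have h2 : k ≤ m := hmin m (PySem.List.min?_mem hmo)
    exact congrArg some (le_antisymm h1 h2)


-- the ranks that B collects, characterised per keyword group
theorem mem_hitsOf {t : String} {r : Int} :
    r ∈ hitsOf t ↔
      ((PySem.Str.isIn "weather" t = true ∨ PySem.Str.isIn "temperature" t = true ∨ PySem.Str.isIn "forecast" t = true) ∧ r = 0) ∨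
      ((PySem.Str.isIn "news" t = true ∨ PySem.Str.isIn "headlines" t = true ∨ PySem.Str.isIn "latest" t = true) ∧ r = 1) ∨
      ((PySem.Str.isIn "remind" t = true ∨ PySem.Str.isIn "reminder" t = true ∨ PySem.Str.isIn "schedule" t = true) ∧ r = 2) ∨
      ((PySem.Str.isIn "time" t = true ∨ PySem.Str.isIn "date" t = true ∨ PySem.Str.isIn "day" t = true) ∧ r = 3) ∨
      ((PySem.Str.isIn "help" t = true ∨ PySem.Str.isIn "command" t = true ∨ PySem.Str.isIn "what can you do" t = true) ∧ r = 4) := by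
  simp [hitsOf, kwRanks, List.mem_filter, List.mem_map]
  constructor
  · rintro ⟨a, h, hin⟩
    rcases h with ⟨rfl,rfl⟩|⟨rfl,rfl⟩|⟨rfl,rfl⟩|⟨rfl,rfl⟩|⟨rfl,rfl⟩|⟨rfl,rfl⟩|⟨rfl,rfl⟩|⟨rfl,rfl⟩|⟨rfl,rfl⟩|⟨rfl,rfl⟩|⟨rfl,rfl⟩|⟨rfl,rfl⟩|⟨rfl,rfl⟩|⟨rfl,rfl⟩|⟨rfl,rfl⟩ <;> simp_all
  · rintro (⟨(h|h|h),rfl⟩|⟨(h|h|h),rfl⟩|⟨(h|h|h),rfl⟩|⟨(h|h|h),rfl⟩|⟨(h|h|h),rfl⟩) <;>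
      [exact ⟨"weather", by simp, h⟩; exact ⟨"temperature", by simp, h⟩; exact ⟨"forecast", by simp, h⟩;
       exact ⟨"news", by simp, h⟩; exact ⟨"headlines", by simp, h⟩; exact ⟨"latest", by simp, h⟩;
       exact ⟨"remind", by simp, h⟩; exact ⟨"reminder", by simp, h⟩; exact ⟨"schedule", by simp, h⟩;
       exact ⟨"time", by simp, h⟩; exact ⟨"date", by simp, h⟩; exact ⟨"day", by simp, h⟩;
       exact ⟨"help", by simp, h⟩; exact ⟨"command", by simp, h⟩; exact ⟨"what can you do", by simp, h⟩]



theorem get_command_intent_eq_alt (text : String) : get_command_intent text = get_command_intent_alt text := by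
  have ha : get_command_intent text =
      (if ["weather", "temperature", "forecast"].any (fun word => PySem.Str.isIn word (PySem.Str.lower text)) then "weather"
       else if ["news", "headlines", "latest"].any (fun word => PySem.Str.isIn word (PySem.Str.lower text)) then "news"
       else if ["remind", "reminder", "schedule"].any (fun word => PySem.Str.isIn word (PySem.Str.lower text)) then "reminder"
       else if ["time", "date", "day"].any (fun word => PySem.Str.isIn word (PySem.Str.lower text)) then "time"
       else if ["help", "command", "what can you do"].any (fun word => PySem.Str.isIn word (PySem.Str.lower text)) then "help"
       else "general") := rfl
  have hb : get_command_intent_alt text =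
      (match PySem.List.min? (hitsOf (PySem.Str.lower text)) (fun r => r) with
       | none => "general"
       | some m => PySem.List.pyGetD intentNames m "") := rfl
  rw [ha, hb]
  by_cases h1 : ["weather", "temperature", "forecast"].any (fun word => PySem.Str.isIn word (PySem.Str.lower text)) = true
  · rw [if_pos h1]
    simp only [List.any_cons, List.any_nil, Bool.or_false, Bool.or_eq_true] at h1
    have h0 : (0:Int) ∈ hitsOf (PySem.Str.lower text) := by
      rw [mem_hitsOf]; exact Or.inl ⟨h1, rfl⟩
    have hlb : ∀ r ∈ hitsOf (PySem.Str.lower text), (0:Int) ≤ r := by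
      intro r hr; rw [mem_hitsOf] at hr
      rcases hr with ⟨hw,rfl⟩|⟨hw,rfl⟩|⟨hw,rfl⟩|⟨hw,rfl⟩|⟨hw,rfl⟩
      · omega
      · omega
      · omega
      · omega
      · omega
    rw [min?_id_eq_of h0 hlb]
    decide
  · rw [if_neg h1]
    simp only [List.any_cons, List.any_nil, Bool.or_false, Bool.or_eq_true, not_or] at h1
    by_cases h2 : ["news", "headlines", "latest"].any (fun word => PySem.Str.isIn word (PySem.Str.lower text)) = true
    · rw [if_pos h2]
      simp only [List.any_cons, List.any_nil, Bool.or_false, Bool.or_eq_true] at h2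
      have h0 : (1:Int) ∈ hitsOf (PySem.Str.lower text) := by
        rw [mem_hitsOf]; exact Or.inr (Or.inl ⟨h2, rfl⟩)
      have hlb : ∀ r ∈ hitsOf (PySem.Str.lower text), (1:Int) ≤ r := by
        intro r hr; rw [mem_hitsOf] at hr
        rcases hr with ⟨hw,rfl⟩|⟨hw,rfl⟩|⟨hw,rfl⟩|⟨hw,rfl⟩|⟨hw,rfl⟩
        · rcases hw with h|h|h
          exacts [absurd h h1.1, absurd h h1.2.1, absurd h h1.2.2]
        · omega
        · omega
        · omega
        · omega
      rw [min?_id_eq_of h0 hlb]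
      decide
    · rw [if_neg h2]
      simp only [List.any_cons, List.any_nil, Bool.or_false, Bool.or_eq_true, not_or] at h2
      by_cases h3 : ["remind", "reminder", "schedule"].any (fun word => PySem.Str.isIn word (PySem.Str.lower text)) = true
      · rw [if_pos h3]
        simp only [List.any_cons, List.any_nil, Bool.or_false, Bool.or_eq_true] at h3
        have h0 : (2:Int) ∈ hitsOf (PySem.Str.lower text) := by
          rw [mem_hitsOf]; exact Or.inr (Or.inr (Or.inl ⟨h3, rfl⟩))
        have hlb : ∀ r ∈ hitsOf (PySem.Str.lower text), (2:Int) ≤ r := by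
          intro r hr; rw [mem_hitsOf] at hr
          rcases hr with ⟨hw,rfl⟩|⟨hw,rfl⟩|⟨hw,rfl⟩|⟨hw,rfl⟩|⟨hw,rfl⟩
          · rcases hw with h|h|h
            exacts [absurd h h1.1, absurd h h1.2.1, absurd h h1.2.2]
          · rcases hw with h|h|h
            exacts [absurd h h2.1, absurd h h2.2.1, absurd h h2.2.2]
          · omega
          · omega
          · omega
        rw [min?_id_eq_of h0 hlb]
        decide
      · rw [if_neg h3]
        simp only [List.any_cons, List.any_nil, Bool.or_false, Bool.or_eq_true, not_or] at h3
        by_cases h4 : ["time", "date", "day"].any (fun word => PySem.Str.isIn word (PySem.Str.lower text)) = true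
        · rw [if_pos h4]
          simp only [List.any_cons, List.any_nil, Bool.or_false, Bool.or_eq_true] at h4
          have h0 : (3:Int) ∈ hitsOf (PySem.Str.lower text) := by
            rw [mem_hitsOf]; exact Or.inr (Or.inr (Or.inr (Or.inl ⟨h4, rfl⟩)))
          have hlb : ∀ r ∈ hitsOf (PySem.Str.lower text), (3:Int) ≤ r := by
            intro r hr; rw [mem_hitsOf] at hr
            rcases hr with ⟨hw,rfl⟩|⟨hw,rfl⟩|⟨hw,rfl⟩|⟨hw,rfl⟩|⟨hw,rfl⟩
            · rcases hw with h|h|h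
              exacts [absurd h h1.1, absurd h h1.2.1, absurd h h1.2.2]
            · rcases hw with h|h|h
              exacts [absurd h h2.1, absurd h h2.2.1, absurd h h2.2.2]
            · rcases hw with h|h|h
              exacts [absurd h h3.1, absurd h h3.2.1, absurd h h3.2.2]
            · omega
            · omega
          rw [min?_id_eq_of h0 hlb]
          decide
        · rw [if_neg h4]
          simp only [List.any_cons, List.any_nil, Bool.or_false, Bool.or_eq_true, not_or] at h4
          by_cases h5 : ["help", "command", "what can you do"].any (fun word => PySem.Str.isIn word (PySem.Str.lower text)) = true
          · rw [if_pos h5]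
            simp only [List.any_cons, List.any_nil, Bool.or_false, Bool.or_eq_true] at h5
            have h0 : (4:Int) ∈ hitsOf (PySem.Str.lower text) := by
              rw [mem_hitsOf]; exact Or.inr (Or.inr (Or.inr (Or.inr (⟨h5, rfl⟩))))
            have hlb : ∀ r ∈ hitsOf (PySem.Str.lower text), (4:Int) ≤ r := by
              intro r hr; rw [mem_hitsOf] at hr
              rcases hr with ⟨hw,rfl⟩|⟨hw,rfl⟩|⟨hw,rfl⟩|⟨hw,rfl⟩|⟨hw,rfl⟩
              · rcases hw with h|h|h
                exacts [absurd h h1.1, absurd h h1.2.1, absurd h h1.2.2]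
              · rcases hw with h|h|h
                exacts [absurd h h2.1, absurd h h2.2.1, absurd h h2.2.2]
              · rcases hw with h|h|h
                exacts [absurd h h3.1, absurd h h3.2.1, absurd h h3.2.2]
              · rcases hw with h|h|h
                exacts [absurd h h4.1, absurd h h4.2.1, absurd h h4.2.2]
              · omega
            rw [min?_id_eq_of h0 hlb]
            decide
          · rw [if_neg h5]
            simp only [List.any_cons, List.any_nil, Bool.or_false, Bool.or_eq_true, not_or] at h5
            have hnil : hitsOf (PySem.Str.lower text) = [] := by
              rw [List.eq_nil_iff_forall_not_mem]
              intro r hr; rw [mem_hitsOf] at hr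
              rcases hr with ⟨hw,_⟩|⟨hw,_⟩|⟨hw,_⟩|⟨hw,_⟩|⟨hw,_⟩ <;> rcases hw with h|h|h
              exacts [absurd h h1.1, absurd h h1.2.1, absurd h h1.2.2, absurd h h2.1, absurd h h2.2.1, absurd h h2.2.2, absurd h h3.1, absurd h h3.2.1, absurd h h3.2.2, absurd h h4.1, absurd h h4.2.1, absurd h h4.2.2, absurd h h5.1, absurd h h5.2.1, absurd h h5.2.2]
            rw [hnil]
            rfl

-- ===== VERDICT (by name: the statement is the Claim_ definition above) =====
theorem get_command_intent_spec : Claim_equal_get_command_intent := by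
  intro text _
  exact get_command_intent_eq_alt text
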